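-- pv_equiv track=rewrite | github.com/chauhanswapnil/Coding-Challenges | LeetCode/tax.py | calculateTaxBrute
-- ===== SOURCE A (Python) =====
-- import itertools
-- import math
--
-- def tax(N,X, Y, S):
--   currentIndex = 0
--   tax = 0
--   while(currentIndex < N-1):
--     currentValue = S[currentIndex]
--     nextValue = S[currentIndex+1]
--     if currentValue == '0' and nextValue == '1':
--       tax += X
--     if currentValue == '1' and nextValue == "0":
--       tax += Y
--     currentIndex += 1
--   return tax
--
-- def calculateTaxBrute(N,X,Y,S):
--   # Time Complexity
--   # Exponential
--   perm = list(itertools.permutations(S, N))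
--   minTax = math.inf
--   for s in perm:
--     t = tax(N, X, Y, s)
--     if t < minTax:
--       minTax = t
--   return minTax
-- ===== SOURCE B (Python) =====
-- def calculateTaxBrute(N, X, Y, S):
--     # DP over counts of '0', '1' and other characters instead of enumerating
--     # all N-permutations: state = (slots left, zeros left, ones left, last class).
--     c0 = S.count('0')
--     c1 = S.count('1')
--     ct = len(S) - c0 - c1
--     if N < 0 or N > len(S):
--         raise ValueError("N must be between 0 and len(S)")
--     memo = {}
--
--     def f(k, n0, n1, nt, last):
--         # min tax of a length-k arrangement drawn from the remaining counts,
--         # given the class of the previously placed character (-1 = none).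
--         if k == 0:
--             return 0
--         key = (k, n0, n1, last)
--         if key in memo:
--             return memo[key]
--         best = None
--         for cls, rem in ((0, (n0 - 1, n1, nt)), (1, (n0, n1 - 1, nt)), (2, (n0, n1, nt - 1))):
--             avail = (n0, n1, nt)[cls]
--             if avail > 0:
--                 sub = f(k - 1, rem[0], rem[1], rem[2], cls)
--                 if sub is not None:
--                     step = X if (last == 0 and cls == 1) else (Y if (last == 1 and cls == 0) else 0)
--                     v = step + sub
--                     if best is None or v < best:
--                         best = v
--         memo[key] = best
--         return best
--
--     return f(N, c0, c1, ct, -1)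
-- ===== Notes on version B (the rewrite author's own statement) =====
-- stated objective: faster
-- what changed: Replaced the factorial enumeration of all N-permutations of S by a memoized DP over character-class counts (zeros, ones, others remaining, last class placed), since the tax of an arrangement depends only on the sequence of classes.
-- outside the precondition, e.g. on calculateTaxBrute(3, 1, 2, '01'): A returns inf, B raises ValueError
import Mathlib
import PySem

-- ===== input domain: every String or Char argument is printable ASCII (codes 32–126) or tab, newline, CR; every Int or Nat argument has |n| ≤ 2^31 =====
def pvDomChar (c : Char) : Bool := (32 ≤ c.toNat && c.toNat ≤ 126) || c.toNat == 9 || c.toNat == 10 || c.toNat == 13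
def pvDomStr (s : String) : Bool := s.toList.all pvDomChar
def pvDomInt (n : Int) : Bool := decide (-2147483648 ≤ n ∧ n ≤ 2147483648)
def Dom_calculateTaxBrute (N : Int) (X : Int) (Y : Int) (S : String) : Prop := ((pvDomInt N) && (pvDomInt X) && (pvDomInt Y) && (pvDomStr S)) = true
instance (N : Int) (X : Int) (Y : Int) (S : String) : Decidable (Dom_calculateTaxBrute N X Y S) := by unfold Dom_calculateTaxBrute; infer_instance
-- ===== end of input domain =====

-- B replaces A's factorial scan of all N-permutations by a memoized DP over
-- character-class counts (objective: faster).

-- ===== PORT A =====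
-- the helper `tax`: while currentIndex < N-1 over the tuple s
def taxLoopA (N X Y : Int) (s : List Char) (currentIndex tax : Int) : Int :=
  if currentIndex < N - 1 then
    match PySem.List.pyGet? s currentIndex, PySem.List.pyGet? s (currentIndex + 1) with
    | some currentValue, some nextValue =>
        let tax1 := if currentValue = '0' ∧ nextValue = '1' then tax + X else tax
        let tax2 := if currentValue = '1' ∧ nextValue = '0' then tax1 + Y else tax1
        taxLoopA N X Y s (currentIndex + 1) tax2
    | _, _ => tax  -- IndexError in Python; unreachable (every tuple here has length N)
  else tax
termination_by (N - 1 - currentIndex).toNat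
decreasing_by omega

def taxA (N X Y : Int) (s : List Char) : Int := taxLoopA N X Y s 0 0

-- `for s in perm: if t < minTax: minTax = t`, with none = math.inf
def minLoopA (N X Y : Int) : List (List Char) → Option Int → Option Int
  | [], minTax => minTax
  | s :: rest, minTax =>
      let t := taxA N X Y s
      minLoopA N X Y rest
        (match minTax with
         | none => some t                       -- t < inf
         | some m => if t < m then some t else some m)

def calculateTaxBrute (N : Int) (X : Int) (Y : Int) (S : String) : Int :=
  if N < 0 then 0   -- ValueError in Python (outside Pre_)
  else
    (minLoopA N X Y (PySem.List.permutations S.toList N.toNat) none).getD 0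
    -- getD 0: Python returns math.inf (a float) on an empty permutation list (outside Pre_)

-- ===== PORT B =====
def altStep (X Y last cls : Int) : Int :=
  if last = 0 ∧ cls = 1 then X else if last = 1 ∧ cls = 0 then Y else 0

-- `if best is None or v < best: best = v`, skipping a missing candidate
def altBest (best v : Option Int) : Option Int :=
  match v with
  | none => best
  | some x =>
    match best with
    | none => some x
    | some b => if x < b then some x else some b

-- the memoized recursion f(k, n0, n1, nt, last); classes 0 = '0', 1 = '1', 2 = other, last = -1 initially
def altF (X Y : Int) : Nat → Nat → Nat → Nat → Int → Option Int
  | 0, _, _, _, _ => some 0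
  | k+1, n0, n1, nt, last =>
    let cand0 : Option Int :=
      if 0 < n0 then (altF X Y k (n0-1) n1 nt 0).map (fun sub => altStep X Y last 0 + sub) else none
    let cand1 : Option Int :=
      if 0 < n1 then (altF X Y k n0 (n1-1) nt 1).map (fun sub => altStep X Y last 1 + sub) else none
    let cand2 : Option Int :=
      if 0 < nt then (altF X Y k n0 n1 (nt-1) 2).map (fun sub => altStep X Y last 2 + sub) else none
    altBest (altBest (altBest none cand0) cand1) cand2

def calculateTaxBrute_alt (N : Int) (X : Int) (Y : Int) (S : String) : Int :=
  let chars := S.toList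
  let c0 := chars.count '0'
  let c1 := chars.count '1'
  let ct := chars.length - c0 - c1
  if N < 0 ∨ (chars.length : Int) < N then 0   -- ValueError in Python B (outside Pre_)
  else (altF X Y N.toNat c0 c1 ct (-1)).getD 0

-- ===== PRECONDITION & SPEC =====
-- Pre_ excludes N < 0 (Python A raises ValueError) and N > len(S) (the permutation
-- list is empty, minTax stays math.inf and A returns a float, not an int; B raises).
def Pre_calculateTaxBrute (N : Int) (X : Int) (Y : Int) (S : String) : Prop :=
  0 ≤ N ∧ N ≤ (S.toList.length : Int)
instance (N : Int) (X : Int) (Y : Int) (S : String) : Decidable (Pre_calculateTaxBrute N X Y S) := by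
  unfold Pre_calculateTaxBrute; infer_instance

def pvWitness_calculateTaxBrute : Int × Int × Int × String := (2, 3, 1, "010")

def Spec_calculateTaxBrute (N : Int) (X : Int) (Y : Int) (S : String) (out : Int) : Prop := out = calculateTaxBrute_alt N X Y S
instance (N : Int) (X : Int) (Y : Int) (S : String) (out : Int) : Decidable (Spec_calculateTaxBrute N X Y S out) := by unfold Spec_calculateTaxBrute; infer_instance

-- ===== CLAIM (what is proved, stated in full; the proofs are below) =====
def Claim_equal_calculateTaxBrute : Prop := ∀ (N : Int) (X : Int) (Y : Int) (S : String), Dom_calculateTaxBrute N X Y S → Pre_calculateTaxBrute N X Y S → Spec_calculateTaxBrute N X Y S (calculateTaxBrute N X Y S)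

-- ===== LEMMAS AND PROOFS =====

-- class of a character
def clsOf (c : Char) : Int := if c = '0' then 0 else if c = '1' then 1 else 2

-- tax of a concrete arrangement, structurally
def pairCost (X Y : Int) : List Char → Int
  | a :: b :: rest => altStep X Y (clsOf a) (clsOf b) + pairCost X Y (b :: rest)
  | _ => 0

-- tax of a class word
def wordCost (X Y last : Int) : List Int → Int
  | [] => 0
  | c :: w => altStep X Y last c + wordCost X Y c w

-- all class words of length k drawable from the remaining counts
def words : Nat → Nat → Nat → Nat → List (List Int)
  | 0, _, _, _ => [[]]
  | k+1, n0, n1, nt =>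
    (if 0 < n0 then (words k (n0-1) n1 nt).map (fun w => (0:Int) :: w) else []) ++
    (if 0 < n1 then (words k n0 (n1-1) nt).map (fun w => (1:Int) :: w) else []) ++
    (if 0 < nt then (words k n0 n1 (nt-1)).map (fun w => (2:Int) :: w) else [])

theorem foldl_min_assoc (l : List Int) (a b : Int) :
    l.foldl min (min a b) = min a (l.foldl min b) := by
  induction l generalizing a b with
  | nil => rfl
  | cons c l ih => simp only [List.foldl_cons, min_assoc, ih]

theorem min?_append (L1 L2 : List Int) : (L1 ++ L2).min? = altBest L1.min? L2.min? := by
  cases L1 with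
  | nil => cases L2 with
    | nil => rfl
    | cons y ys => simp [altBest]
  | cons x xs =>
    cases L2 with
    | nil => simp [altBest]
    | cons y ys =>
      simp only [List.cons_append, List.min?_cons', List.foldl_append, altBest]
      rw [List.foldl_cons, foldl_min_assoc ys (xs.foldl min x) y]
      rcases lt_or_ge (ys.foldl min y) (xs.foldl min x) with h | h
      · rw [if_pos h, min_eq_right h.le]
      · rw [if_neg (not_lt.mpr h), min_eq_left h]

theorem min?_map_add (c : Int) (L : List Int) :
    (L.map (fun v => c + v)).min? = L.min?.map (fun v => c + v) := by
  cases L with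
  | nil => rfl
  | cons x xs =>
    simp only [List.map_cons, List.min?_cons', Option.map_some]
    congr 1
    induction xs generalizing x with
    | nil => rfl
    | cons y ys ih =>
      simp only [List.map_cons, List.foldl_cons]
      rw [show min (c + x) (c + y) = c + min x y from min_add_add_left c x y]
      exact ih (min x y)

theorem min?_eq_of_dom (L1 L2 : List Int)
    (h12 : ∀ v ∈ L1, ∃ u ∈ L2, u ≤ v) (h21 : ∀ u ∈ L2, ∃ v ∈ L1, v ≤ u) :
    L1.min? = L2.min? := by
  match h1 : L1.min?, h2 : L2.min? with
  | none, none => rfl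
  | none, some b =>
    rw [List.min?_eq_none_iff] at h1
    obtain ⟨v, hv, -⟩ := h21 b (List.min?_mem h2)
    simp [h1] at hv
  | some a, none =>
    rw [List.min?_eq_none_iff] at h2
    obtain ⟨u, hu, -⟩ := h12 a (List.min?_mem h1)
    simp [h2] at hu
  | some a, some b =>
    rw [List.min?_eq_some_iff] at h1 h2
    obtain ⟨u, hu, hub⟩ := h12 a h1.1
    obtain ⟨v, hv, hva⟩ := h21 b h2.1
    have : b ≤ a := le_trans (h2.2 u hu) hub
    have : a ≤ b := le_trans (h1.2 v hv) hva
    simp; omega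

theorem minLoopA_some (N X Y : Int) (L : List (List Char)) (a : Int) :
    minLoopA N X Y L (some a) = some ((L.map (taxA N X Y)).foldl min a) := by
  induction L generalizing a with
  | nil => rfl
  | cons s rest ih =>
    have hm : (if taxA N X Y s < a then some (taxA N X Y s) else some a) = some (min a (taxA N X Y s)) := by
      rcases lt_or_ge (taxA N X Y s) a with h | h
      · rw [if_pos h, min_eq_right h.le]
      · rw [if_neg (not_lt.mpr h), min_eq_left h]
    simp only [minLoopA, hm, ih, List.map_cons, List.foldl_cons]

theorem minLoopA_none (N X Y : Int) (L : List (List Char)) :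
    minLoopA N X Y L none = (L.map (taxA N X Y)).min? := by
  cases L with
  | nil => rfl
  | cons s rest => simp only [minLoopA, minLoopA_some, List.map_cons, List.min?_cons']

theorem pairCost_nil (X Y : Int) : pairCost X Y [] = 0 := rfl
theorem pairCost_single (X Y : Int) (x : Char) : pairCost X Y [x] = 0 := rfl
theorem pairCost_cons₂ (X Y : Int) (a b : Char) (r : List Char) :
    pairCost X Y (a :: b :: r) = altStep X Y (clsOf a) (clsOf b) + pairCost X Y (b :: r) := rfl
theorem wordCost_cons (X Y last c : Int) (w : List Int) :
    wordCost X Y last (c :: w) = altStep X Y last c + wordCost X Y c w := rfl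

theorem step_arith (X Y t P : Int) (cv nv : Char) :
    (if cv = '1' ∧ nv = '0' then (if cv = '0' ∧ nv = '1' then t + X else t) + Y
     else (if cv = '0' ∧ nv = '1' then t + X else t)) + P
    = t + (altStep X Y (clsOf cv) (clsOf nv) + P) := by
  simp only [altStep, clsOf]
  by_cases c0 : cv = '0' <;> by_cases c1 : nv = '1' <;> by_cases c2 : cv = '1' <;>
    by_cases c3 : nv = '0' <;> simp_all <;> ring

theorem taxLoopA_spec (X Y : Int) (s : List Char) (i t : Int) (hi : 0 ≤ i) :
    taxLoopA (s.length) X Y s i t = t + pairCost X Y (s.drop i.toNat) := by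
  by_cases h : i < (s.length : Int) - 1
  · have h1 : i.toNat < s.length := by omega
    have h2 : i.toNat + 1 < s.length := by omega
    have e2 : (i+1).toNat = i.toNat + 1 := by omega
    have e1 : PySem.List.pyGet? s i = some s[i.toNat] := by
      rw [PySem.List.pyGet?_of_nonneg s hi, List.getElem?_eq_getElem h1]
    have e1' : PySem.List.pyGet? s (i+1) = some s[i.toNat + 1] := by
      rw [PySem.List.pyGet?_of_nonneg s (by omega : (0:Int) ≤ i + 1)]
      rw [e2, List.getElem?_eq_getElem h2]
    have hrec : ∀ u, taxLoopA (↑s.length) X Y s (i+1) u = u + pairCost X Y (s.drop (i.toNat + 1)) :=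
      fun u => by rw [taxLoopA_spec X Y s (i+1) u (by omega), e2]
    have hd : s.drop i.toNat = s[i.toNat] :: s[i.toNat + 1] :: s.drop (i.toNat + 2) := by
      rw [List.drop_eq_getElem_cons h1, List.drop_eq_getElem_cons h2]
    have hd1 : s.drop (i.toNat + 1) = s[i.toNat + 1] :: s.drop (i.toNat + 2) :=
      List.drop_eq_getElem_cons h2
    rw [taxLoopA, if_pos h, e1, e1']
    simp only [hrec]
    rw [hd]
    rw [pairCost_cons₂, ← hd1]
    exact step_arith X Y t (pairCost X Y (s.drop (i.toNat + 1))) s[i.toNat] s[i.toNat + 1]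
  · rw [taxLoopA, if_neg h]
    have hlen : (s.drop i.toNat).length ≤ 1 := by
      simp only [List.length_drop]; omega
    match hm : s.drop i.toNat with
    | [] => rw [pairCost_nil]; ring
    | [x] => rw [pairCost_single]; ring
    | x :: y :: r => rw [hm] at hlen; simp at hlen
termination_by ((s.length : Int) - 1 - i).toNat
decreasing_by omega

theorem altStep_neg_one (X Y c : Int) : altStep X Y (-1) c = 0 := by
  simp [altStep]

theorem wordCost_clsOf (X Y : Int) : ∀ (s : List Char) (a : Char),
    wordCost X Y (clsOf a) (s.map clsOf) = pairCost X Y (a :: s) := by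
  intro s
  induction s with
  | nil => intro a; rfl
  | cons b r ih =>
    intro a
    rw [List.map_cons, wordCost_cons, ih b, pairCost_cons₂]

theorem pairCost_eq_wordCost (X Y : Int) (s : List Char) :
    wordCost X Y (-1) (s.map clsOf) = pairCost X Y s := by
  cases s with
  | nil => rfl
  | cons a r =>
    rw [List.map_cons, wordCost_cons, altStep_neg_one, wordCost_clsOf]
    ring

theorem altBest_none_left (v : Option Int) : altBest none v = v := by
  cases v <;> rfl

theorem part_min? (X Y last c : Int) (p : Prop) [Decidable p] (W : List (List Int)) :
    ((if p then W.map (fun w => c :: w) else []).map (wordCost X Y last)).min?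
      = if p then (W.map (wordCost X Y c)).min?.map (fun v => altStep X Y last c + v) else none := by
  split_ifs with h
  · rw [List.map_map]
    have e : W.map (wordCost X Y last ∘ fun w => c :: w)
        = W.map ((fun v => altStep X Y last c + v) ∘ wordCost X Y c) :=
      List.map_congr_left fun w _ => by simp [Function.comp, wordCost_cons]
    rw [e, ← List.map_map, min?_map_add]
  · simp

theorem altF_min? (X Y : Int) (k n0 n1 nt : Nat) (last : Int) :
    altF X Y k n0 n1 nt last = ((words k n0 n1 nt).map (wordCost X Y last)).min? := by
  induction k generalizing n0 n1 nt last with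
  | zero => simp [altF, words, wordCost]
  | succ k ih =>
    simp only [altF, words, List.map_append, min?_append, altBest_none_left]
    rw [part_min?, part_min?, part_min?]
    simp only [ih]

theorem mem_words_iff (k n0 n1 nt : Nat) (w : List Int) :
    w ∈ words k n0 n1 nt ↔
      w.length = k ∧ (∀ x ∈ w, x = 0 ∨ x = 1 ∨ x = 2) ∧
      w.count 0 ≤ n0 ∧ w.count 1 ≤ n1 ∧ w.count 2 ≤ nt := by
  induction k generalizing n0 n1 nt w with
  | zero =>
    simp only [words, List.mem_singleton]
    constructor
    · rintro rfl; simp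
    · rintro ⟨h, -⟩; exact List.eq_nil_of_length_eq_zero h
  | succ k ih =>
    simp only [words, List.mem_append, List.mem_ite_nil_right, List.mem_map]
    constructor
    · rintro ((⟨h0, w', hw', rfl⟩ | ⟨h1, w', hw', rfl⟩) | ⟨h2, w', hw', rfl⟩) <;>
        obtain ⟨hl, hall, hc0, hc1, hc2⟩ := (ih _ _ _ _).mp hw' <;>
        refine ⟨by simp [hl], ?_, ?_, ?_, ?_⟩ <;>
        first
          | (intro x hx; rcases List.mem_cons.mp hx with rfl | hx; · norm_num
             exact hall x hx)
          | (simp [List.count_cons]; omega)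
    · rintro ⟨hl, hall, hc0, hc1, hc2⟩
      match w with
      | [] => simp at hl
      | c :: w' =>
        rcases hall c List.mem_cons_self with rfl | rfl | rfl
        · refine Or.inl (Or.inl ⟨?_, w', (ih _ _ _ _).mpr ⟨by simpa using hl, fun x hx => hall x (List.mem_cons_of_mem _ hx), ?_, ?_, ?_⟩, rfl⟩) <;>
            simp [List.count_cons] at hc0 hc1 hc2 ⊢ <;> omega
        · refine Or.inl (Or.inr ⟨?_, w', (ih _ _ _ _).mpr ⟨by simpa using hl, fun x hx => hall x (List.mem_cons_of_mem _ hx), ?_, ?_, ?_⟩, rfl⟩) <;>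
            simp [List.count_cons] at hc0 hc1 hc2 ⊢ <;> omega
        · refine Or.inr ⟨?_, w', (ih _ _ _ _).mpr ⟨by simpa using hl, fun x hx => hall x (List.mem_cons_of_mem _ hx), ?_, ?_, ?_⟩, rfl⟩ <;>
            simp [List.count_cons] at hc0 hc1 hc2 ⊢ <;> omega

theorem count_split (l : List Char) :
    l.count '0' + l.count '1' + l.countP (fun c => !(c == '0') && !(c == '1')) = l.length := by
  induction l with
  | nil => rfl
  | cons a l ih =>
    by_cases h0 : a = '0' <;> by_cases h1 : a = '1' <;>
      simp_all [List.count_cons, List.countP_cons] <;> omega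

theorem countP_le_of_mem_permutations {xs s : List Char} {r : Nat}
    (h : s ∈ PySem.List.permutations xs r) (p : Char → Bool) :
    s.countP p ≤ xs.countP p := by
  obtain ⟨-, rest, hperm⟩ := PySem.List.exists_perm_of_mem_permutations r xs s h
  have := hperm.countP_eq p
  rw [List.countP_append] at this
  omega

theorem mem_permutations_of_subperm :
    ∀ (s xs : List Char), s.Subperm xs → s ∈ PySem.List.permutations xs s.length := by
  intro s
  induction s with
  | nil => intro xs _; simp [PySem.List.permutations_zero]
  | cons c t ih =>
    intro xs h
    have hc : c ∈ xs := h.subset List.mem_cons_self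
    have hsome : (xs.idxOf? c).isSome := List.isSome_idxOf?.mpr hc
    obtain ⟨i, hi⟩ := Option.isSome_iff_exists.mp hsome
    obtain ⟨hlt, hget, -⟩ := List.idxOf?_eq_some_iff.mp hi
    have herase : xs.erase c = xs.eraseIdx i := by
      rw [List.erase_eq_eraseIdx, hi]
    have ht : t.Subperm (xs.eraseIdx i) := by
      rw [← herase]
      exact (List.subperm_cons c).mp (h.trans (List.perm_cons_erase hc).subperm)
    have hmem : t ∈ PySem.List.permutations (xs.eraseIdx i) t.length := ih _ ht
    show (c :: t) ∈ PySem.List.permutations xs (t.length + 1)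
    simp only [PySem.List.permutations]
    refine List.mem_flatMap.mpr ⟨i, List.mem_range.mpr hlt, ?_⟩
    rw [List.getElem?_eq_getElem hlt, hget]
    exact List.mem_map.mpr ⟨t, hmem, rfl⟩

theorem countP_erase (p : Char → Bool) (x : Char) (pool : List Char) (hx : x ∈ pool) :
    (pool.erase x).countP p = pool.countP p - (if p x then 1 else 0) := by
  have := (List.perm_cons_erase hx).countP_eq p
  rw [List.countP_cons] at this
  split_ifs with h <;> simp [h] at this ⊢ <;> omega

theorem realize_word :
    ∀ (w : List Int) (pool : List Char),
      (∀ x ∈ w, x = 0 ∨ x = 1 ∨ x = 2) →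
      w.count 0 ≤ pool.count '0' →
      w.count 1 ≤ pool.count '1' →
      w.count 2 ≤ pool.countP (fun c => !(c == '0') && !(c == '1')) →
      ∃ s : List Char, s.Subperm pool ∧ s.map clsOf = w := by
  intro w
  induction w with
  | nil => exact fun pool _ _ _ _ => ⟨[], List.nil_subperm, rfl⟩
  | cons c w' ih =>
    intro pool hall hc0 hc1 hc2
    have hget : ∃ x, x ∈ pool ∧ clsOf x = c ∧
        ((w'.count 0 ≤ (pool.erase x).count '0') ∧
         (w'.count 1 ≤ (pool.erase x).count '1') ∧
         (w'.count 2 ≤ (pool.erase x).countP (fun ch => !(ch == '0') && !(ch == '1')))) := by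
      rcases hall c List.mem_cons_self with rfl | rfl | rfl
      · have hpos : 0 < pool.count '0' := by simp [List.count_cons] at hc0; omega
        refine ⟨'0', List.count_pos_iff.mp hpos, by simp [clsOf], ?_, ?_, ?_⟩
        · rw [List.count_erase_self]; simp [List.count_cons] at hc0; omega
        · rw [List.count_erase_of_ne (by decide)]; simp [List.count_cons] at hc1; omega
        · rw [countP_erase _ _ _ (List.count_pos_iff.mp hpos)]
          simp [List.count_cons] at hc2; simp; omega
      · have hpos : 0 < pool.count '1' := by simp [List.count_cons] at hc1; omega
        refine ⟨'1', List.count_pos_iff.mp hpos, by simp [clsOf], ?_, ?_, ?_⟩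
        · rw [List.count_erase_of_ne (by decide)]; simp [List.count_cons] at hc0; omega
        · rw [List.count_erase_self]; simp [List.count_cons] at hc1; omega
        · rw [countP_erase _ _ _ (List.count_pos_iff.mp hpos)]
          simp [List.count_cons] at hc2; simp; omega
      · have hpos : 0 < pool.countP (fun ch => !(ch == '0') && !(ch == '1')) := by
          simp [List.count_cons] at hc2; omega
        obtain ⟨x, hxmem, hxp⟩ := List.countP_pos_iff.mp hpos
        simp only [Bool.and_eq_true, Bool.not_eq_eq_eq_not, Bool.not_true, beq_eq_false_iff_ne] at hxp
        refine ⟨x, hxmem, by simp [clsOf, hxp.1, hxp.2], ?_, ?_, ?_⟩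
        · rw [List.count_erase_of_ne (Ne.symm hxp.1)]; simp [List.count_cons] at hc0; omega
        · rw [List.count_erase_of_ne (Ne.symm hxp.2)]; simp [List.count_cons] at hc1; omega
        · rw [countP_erase _ _ _ hxmem]
          have hx2 : (!(x == '0') && !(x == '1')) = true := by simp [hxp.1, hxp.2]
          rw [hx2]; simp [List.count_cons] at hc2; simp; omega
    obtain ⟨x, hxmem, hxcls, hb0, hb1, hb2⟩ := hget
    obtain ⟨s', hs'sub, hs'map⟩ := ih (pool.erase x) (fun z hz => hall z (List.mem_cons_of_mem _ hz)) hb0 hb1 hb2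
    refine ⟨x :: s', ?_, by simp [hs'map, hxcls]⟩
    exact ((List.subperm_cons x).mpr hs'sub).trans (List.perm_cons_erase hxmem).symm.subperm

theorem clsOf_beq0 (a : Char) : (clsOf a == (0:Int)) = (a == '0') := by
  unfold clsOf; split_ifs <;> simp_all
theorem clsOf_beq1 (a : Char) : (clsOf a == (1:Int)) = (a == '1') := by
  unfold clsOf; split_ifs <;> simp_all
theorem clsOf_beq2 (a : Char) : (clsOf a == (2:Int)) = (!(a == '0') && !(a == '1')) := by
  unfold clsOf; split_ifs <;> simp_all

theorem count_eq_countP_clsOf (s : List Char) (c : Int) (p : Char → Bool)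
    (hp : ∀ a, (clsOf a == c) = p a) :
    (s.map clsOf).count c = s.countP p := by
  rw [List.count, List.countP_map]
  apply List.countP_congr
  intro a _
  simp only [Function.comp_apply, hp a]

-- ===== VERDICT (by name: the statement is the Claim_ definition above) =====
theorem calculateTaxBrute_spec : Claim_equal_calculateTaxBrute := by
  intro N X Y S _ hpre
  obtain ⟨hN0, hNlen⟩ := hpre
  show calculateTaxBrute N X Y S = calculateTaxBrute_alt N X Y S
  set chars := S.toList with hchars
  have hc01 : chars.count '0' + chars.count '1' + chars.countP (fun c => !(c == '0') && !(c == '1')) = chars.length :=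
    count_split chars
  unfold calculateTaxBrute calculateTaxBrute_alt
  rw [if_neg (by omega), if_neg (by push_neg; constructor <;> omega)]
  rw [minLoopA_none, altF_min?]
  have key : ((PySem.List.permutations chars N.toNat).map (taxA N X Y)).min?
      = ((words N.toNat (chars.count '0') (chars.count '1') (chars.length - chars.count '0' - chars.count '1')).map (wordCost X Y (-1))).min? := by
    apply min?_eq_of_dom
    · intro v hv
      obtain ⟨s, hs, rfl⟩ := List.mem_map.mp hv
      have hslen : s.length = N.toNat := PySem.List.length_of_mem_permutations hs
      have hNeq : N = (s.length : Int) := by omega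
      have htax : taxA N X Y s = wordCost X Y (-1) (s.map clsOf) := by
        rw [taxA, hNeq, taxLoopA_spec X Y s 0 0 le_rfl]
        simp only [Int.toNat_zero, List.drop_zero, zero_add]
        rw [pairCost_eq_wordCost]
      refine ⟨wordCost X Y (-1) (s.map clsOf), List.mem_map.mpr ⟨s.map clsOf, ?_, rfl⟩, by rw [htax]⟩
      rw [mem_words_iff]
      refine ⟨by simp [hslen], ?_, ?_, ?_, ?_⟩
      · intro x hx
        obtain ⟨a, -, rfl⟩ := List.mem_map.mp hx
        unfold clsOf; split_ifs <;> simp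
      · rw [count_eq_countP_clsOf s 0 (· == '0') clsOf_beq0]
        exact countP_le_of_mem_permutations hs _
      · rw [count_eq_countP_clsOf s 1 (· == '1') clsOf_beq1]
        exact countP_le_of_mem_permutations hs _
      · rw [count_eq_countP_clsOf s 2 (fun c => !(c == '0') && !(c == '1')) clsOf_beq2]
        have := countP_le_of_mem_permutations hs (fun c => !(c == '0') && !(c == '1'))
        omega
    · intro u hu
      obtain ⟨w, hw, rfl⟩ := List.mem_map.mp hu
      obtain ⟨hwl, hwall, hw0, hw1, hw2⟩ := (mem_words_iff _ _ _ _ _).mp hw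
      obtain ⟨s, hsub, hmap⟩ := realize_word w chars hwall hw0 hw1 (by omega)
      have hslen : s.length = N.toNat := by
        have := congrArg List.length hmap
        simp at this; omega
      have hsmem : s ∈ PySem.List.permutations chars N.toNat := by
        rw [← hslen]; exact mem_permutations_of_subperm s chars hsub
      have hNeq : N = (s.length : Int) := by omega
      refine ⟨taxA N X Y s, List.mem_map.mpr ⟨s, hsmem, rfl⟩, ?_⟩
      rw [taxA, hNeq, taxLoopA_spec X Y s 0 0 le_rfl]
      simp only [Int.toNat_zero, List.drop_zero, zero_add]
      rw [← pairCost_eq_wordCost, hmap]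
  rw [key]
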